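-- pv_equiv track=rewrite | github.com/StBinge/leetcode | 2507.smallest-value-after-replacing-with-sum-of-prime-factors.py | smallestValue
-- ===== SOURCE A (Python) =====
-- def smallestValue(n: int) -> int:
--     while True:
--         s=0
--         i=2
--         x=n
--         while i*i<=n:
--             while n%i==0:
--                 s+=i
--                 n//=i
--             i+=1
--         if n>1:
--             s+=n
--         if s==x:
--             return x
--         n=s
-- ===== SOURCE B (Python) =====
-- def _spf(n: int) -> int:
--     # sum of prime factors (with multiplicity): strip the smallest divisor and recurse
--     if n < 2:
--         return 0
--     d = 2
--     while d * d <= n: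
--         if n % d == 0:
--             return d + _spf(n // d)
--         d += 1
--     return n
--
-- def smallestValue(n: int) -> int:
--     s = _spf(n)
--     return n if s == n else smallestValue(s)
-- ===== Notes on version B (the rewrite author's own statement) =====
-- stated objective: alternative
-- what changed: Replaces A's while-True fixed-point loop with nested full-multiplicity trial-division loops by a recursive driver over a helper that strips only the smallest divisor and recurses on the quotient (restarting the divisor search), a different decomposition of the same per-step computation.
import Mathlib
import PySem

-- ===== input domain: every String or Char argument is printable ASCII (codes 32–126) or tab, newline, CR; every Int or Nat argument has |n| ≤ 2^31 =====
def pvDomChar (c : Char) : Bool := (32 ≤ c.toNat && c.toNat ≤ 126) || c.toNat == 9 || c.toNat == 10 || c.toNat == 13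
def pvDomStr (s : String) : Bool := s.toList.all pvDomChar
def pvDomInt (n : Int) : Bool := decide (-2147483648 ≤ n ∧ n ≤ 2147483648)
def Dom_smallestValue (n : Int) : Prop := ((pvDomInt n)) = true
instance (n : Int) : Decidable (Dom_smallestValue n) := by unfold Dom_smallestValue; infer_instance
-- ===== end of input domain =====

-- B replaces A's while-True fixed-point loop with nested full-multiplicity factor loops by a
-- recursive fixed-point driver over a helper that strips only the smallest divisor and recurses
-- on the quotient (alternative decomposition, same cost).
-- All loops are ported with a fuel parameter as a pure totality guard; the fuel amounts are
-- proved sufficient below (the `fuel = 0` branches are never reached on any input).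

-- ===== PORT A =====

-- inner loop `while n%i==0: s+=i; n//=i`
def pvA_div : Nat → Int → Int → Int → Int × Int
  | 0, _, n, s => (n, s)
  | fuel + 1, i, n, s =>
    if PySem.Int.mod n i = 0 then pvA_div fuel i (PySem.Int.floordiv n i) (s + i) else (n, s)

-- middle loop `while i*i<=n: <inner>; i+=1`
def pvA_sqrt : Nat → Int → Int → Int → Int × Int
  | 0, _, n, s => (n, s)
  | fuel + 1, i, n, s =>
    if i * i ≤ n then
      pvA_sqrt fuel (i + 1) (pvA_div n.toNat i n s).1 (pvA_div n.toNat i n s).2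
    else (n, s)

-- `while True:` outer fixed-point loop: one pass is `s=0; i=2; x=n; <loops>; if n>1: s+=n`,
-- then `if s==x: return x` else repeat with n=s (the pass expression is written twice in
-- place of Python's local variable s)
def pvA_outer : Nat → Int → Int
  | 0, n => n
  | fuel + 1, n =>
    if (if 1 < (pvA_sqrt n.toNat 2 n 0).1 then (pvA_sqrt n.toNat 2 n 0).2 + (pvA_sqrt n.toNat 2 n 0).1
        else (pvA_sqrt n.toNat 2 n 0).2) = n
    then n
    else pvA_outer fuel
      (if 1 < (pvA_sqrt n.toNat 2 n 0).1 then (pvA_sqrt n.toNat 2 n 0).2 + (pvA_sqrt n.toNat 2 n 0).1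
       else (pvA_sqrt n.toNat 2 n 0).2)

def smallestValue (n : Int) : Int := pvA_outer (2 * n.toNat + 2) n

-- ===== PORT B =====

mutual
-- `_spf(n)`: sum of prime factors by stripping the smallest divisor and recursing
def pvB_spf : Nat → Int → Int
  | 0, _ => 0
  | fuel + 1, n => if n < 2 then 0 else pvB_loop fuel 2 n

-- `while d*d<=n: if n%d==0: return d+_spf(n//d); d+=1` then `return n`
def pvB_loop : Nat → Int → Int → Int
  | 0, _, n => n
  | fuel + 1, d, n =>
    if d * d ≤ n then
      if PySem.Int.mod n d = 0 then d + pvB_spf fuel (PySem.Int.floordiv n d)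
      else pvB_loop fuel (d + 1) n
    else n
end

-- `return n if s == n else smallestValue(s)` recursive driver
def pvB_drive : Nat → Int → Int
  | 0, n => n
  | fuel + 1, n =>
    if pvB_spf (2 * n.toNat + 1) n = n then n
    else pvB_drive fuel (pvB_spf (2 * n.toNat + 1) n)

def smallestValue_alt (n : Int) : Int := pvB_drive (2 * n.toNat + 2) n

-- ===== PRECONDITION & SPEC =====
def Spec_smallestValue (n : Int) (out : Int) : Prop := out = smallestValue_alt n
instance (n : Int) (out : Int) : Decidable (Spec_smallestValue n out) := by unfold Spec_smallestValue; infer_instance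

-- ===== CLAIM (what is proved, stated in full; the proofs are below) =====
def Claim_equal_smallestValue : Prop := ∀ (n : Int), Dom_smallestValue n → Spec_smallestValue n (smallestValue n)

-- ===== LEMMAS AND PROOFS =====

theorem pv_dvd_toNat (i n : Int) (hi : 0 ≤ i) (hn : 0 ≤ n) : i.toNat ∣ n.toNat ↔ i ∣ n := by
  rw [← Int.natCast_dvd_natCast, Int.toNat_of_nonneg hi, Int.toNat_of_nonneg hn]

theorem pv_ediv_lt_self (a b : Int) (ha : 1 ≤ a) (hb : 2 ≤ b) : a / b < a := by
  have h0 : 0 ≤ a / b := Int.ediv_nonneg (by omega) (by omega)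
  have h1 : b * (a / b) + a % b = a := Int.ediv_add_emod a b
  have h2 : 0 ≤ a % b := Int.emod_nonneg a (by omega)
  nlinarith

-- mathematical mediator: sum of prime factors with multiplicity, via Nat.minFac
def sumPF (m : Nat) : Nat :=
  if h : 2 ≤ m then m.minFac + sumPF (m / m.minFac) else 0
termination_by m
decreasing_by
  exact Nat.div_lt_self (by omega) (Nat.minFac_prime (by omega)).two_le

theorem sumPF_lt2 (m : Nat) (h : m < 2) : sumPF m = 0 := by
  rw [sumPF, dif_neg (by omega)]

theorem sumPF_le : ∀ m : Nat, sumPF m ≤ m := by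
  intro m
  induction m using Nat.strong_induction_on with
  | _ m ih =>
    by_cases h2 : 2 ≤ m
    · have hp := Nat.minFac_prime (show m ≠ 1 by omega)
      have hdvd := Nat.minFac_dvd m
      have hp2 := hp.two_le
      have hmul : m.minFac * (m / m.minFac) = m := Nat.mul_div_cancel' hdvd
      have hqlt : m / m.minFac < m := Nat.div_lt_self (by omega) (by omega)
      have hrec := ih (m / m.minFac) hqlt
      rw [sumPF, dif_pos h2]
      rcases Nat.lt_or_ge (m / m.minFac) 2 with hq | hq
      · have hq1 : m / m.minFac = 1 := by
          rcases (show m / m.minFac = 0 ∨ m / m.minFac = 1 by omega) with h0 | h1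
          · exfalso; rw [h0, Nat.mul_zero] at hmul; omega
          · exact h1
        rw [hq1, Nat.mul_one] at hmul
        rw [hq1, sumPF_lt2 1 (by omega)]
        omega
      · nlinarith
    · rw [sumPF_lt2 m (by omega)]; omega

theorem minFac_eq_of_min (N d : Nat) (hd : 2 ≤ d) (hdvd : d ∣ N) (hN : 1 ≤ N)
    (hmin : ∀ e, 2 ≤ e → e < d → ¬ e ∣ N) : N.minFac = d := by
  have hN2 : 2 ≤ N := le_trans hd (Nat.le_of_dvd (by omega) hdvd)
  have h1 : N.minFac ≤ d := Nat.minFac_le_of_dvd hd hdvd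
  have h2 : 2 ≤ N.minFac := (Nat.minFac_prime (by omega)).two_le
  have h3 := Nat.minFac_dvd N
  by_contra hne
  exact hmin N.minFac h2 (by omega) h3

theorem minFac_eq_self (N i : Nat) (hN : 2 ≤ N) (hi : N < i * i)
    (hmin : ∀ e, 2 ≤ e → e < i → ¬ e ∣ N) : N.minFac = N := by
  have hp := Nat.minFac_prime (show N ≠ 1 by omega)
  have h3 := Nat.minFac_dvd N
  have h2 := hp.two_le
  have hge : i ≤ N.minFac := by
    by_contra hc
    exact hmin N.minFac h2 (by omega) h3
  by_cases hNp : N.Prime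
  · exact (Nat.prime_def_minFac.mp hNp).2
  · exfalso
    have hsq := Nat.minFac_sq_le_self (by omega) hNp
    nlinarith [hsq, hge]

theorem sumPF_of_minFac_self (N : Nat) (h2 : 2 ≤ N) (hm : N.minFac = N) : sumPF N = N := by
  rw [sumPF, dif_pos h2, hm, Nat.div_self (by omega), sumPF_lt2 1 (by omega)]
  omega

-- one full strip of factor i equals the corresponding prefix of sumPF's chain
theorem A_div_eq : ∀ (f : Nat) (i n s : Int), n.toNat ≤ f → 2 ≤ i → 1 ≤ n →
    (∀ e : Nat, 2 ≤ e → (e : Int) < i → ¬ e ∣ n.toNat) →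
    1 ≤ (pvA_div f i n s).1 ∧ (pvA_div f i n s).1.toNat ∣ n.toNat ∧
    ¬ i.toNat ∣ (pvA_div f i n s).1.toNat ∧
    (pvA_div f i n s).2 + (sumPF (pvA_div f i n s).1.toNat : Int) = s + (sumPF n.toNat : Int) := by
  intro f
  induction f with
  | zero => intro i n s hk hi hn; omega
  | succ k ih =>
    intro i n s hk hi hn hmin
    simp only [pvA_div]
    split
    · rename_i h
      have hdvd : i ∣ n := (PySem.Int.mod_eq_zero_iff_dvd n i).1 h
      have hq : PySem.Int.floordiv n i = n / i := PySem.Int.floordiv_eq_ediv_of_pos (by omega)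
      have hmul : i * (n / i) = n := Int.mul_ediv_cancel' hdvd
      have hq0 : 0 ≤ n / i := Int.ediv_nonneg (by omega) (by omega)
      have hq1 : 1 ≤ n / i := by nlinarith
      have hqlt : n / i < n := pv_ediv_lt_self _ _ (by omega) (by omega)
      have hdvdN : i.toNat ∣ n.toNat := (pv_dvd_toNat i n (by omega) (by omega)).2 hdvd
      have hmf : n.toNat.minFac = i.toNat :=
        minFac_eq_of_min n.toNat i.toNat (by omega) hdvdN (by omega)
          (fun e he hlt => hmin e he (by omega))
      have hqN : (n / i).toNat = n.toNat / i.toNat := by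
        rcases hdvd with ⟨c, hc⟩
        have hc0 : 0 ≤ c := by nlinarith
        have he : n / i = c := by rw [hc]; exact Int.mul_ediv_cancel_left c (by omega)
        have hN : n.toNat = i.toNat * c.toNat := by
          have h1 : (i.toNat : Int) = i := Int.toNat_of_nonneg (by omega)
          have h2 : (c.toNat : Int) = c := Int.toNat_of_nonneg hc0
          have h3 : ((i.toNat * c.toNat : Nat) : Int) = (n.toNat : Int) := by
            push_cast
            rw [h1, h2]
            omega
          exact_mod_cast h3.symm
        rw [he, hN, Nat.mul_div_cancel_left _ (by omega)]
      have hsum : sumPF n.toNat = i.toNat + sumPF (n.toNat / i.toNat) := by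
        rw [sumPF, dif_pos (by omega), hmf]
      have hminq : ∀ e : Nat, 2 ≤ e → (e : Int) < i → ¬ e ∣ (n / i).toNat := by
        intro e he hlt hdv
        exact hmin e he hlt (hdv.trans (by rw [hqN]; exact Nat.div_dvd_of_dvd hdvdN))
      rw [hq]
      have hrec := ih i (n / i) (s + i) (by omega) hi (by omega) hminq
      rcases hrec with ⟨r1, r2, r3, r4⟩
      refine ⟨r1, r2.trans (by rw [hqN]; exact Nat.div_dvd_of_dvd hdvdN), r3, ?_⟩
      rw [r4, hsum]
      push_cast
      rw [← hqN]
      omega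
    · rename_i h
      have hnd : ¬ i ∣ n := fun hd => h ((PySem.Int.mod_eq_zero_iff_dvd n i).2 hd)
      refine ⟨hn, dvd_rfl, ?_, by simp⟩
      intro hdN
      exact hnd ((pv_dvd_toNat i n (by omega) (by omega)).1 hdN)

theorem A_sqrt_eq : ∀ (f : Nat) (i n s : Int), (n + 1 - i).toNat ≤ f → 2 ≤ i → 1 ≤ n →
    (∀ e : Nat, 2 ≤ e → (e : Int) < i → ¬ e ∣ n.toNat) →
    (pvA_sqrt f i n s).2 + (if 1 < (pvA_sqrt f i n s).1 then (pvA_sqrt f i n s).1 else 0)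
      = s + (sumPF n.toNat : Int) := by
  intro f
  induction f with
  | zero =>
    intro i n s hk hi hn hmin
    simp only [pvA_sqrt]
    have hni : n < i * i := by
      have h1 : n < i := by omega
      nlinarith
    by_cases h1 : 1 < n
    · have hmf : n.toNat.minFac = n.toNat :=
        minFac_eq_self n.toNat i.toNat (by omega)
          (by
            have ha : (i.toNat : Int) = i := Int.toNat_of_nonneg (by omega)
            have hb : ((i.toNat * i.toNat : Nat) : Int) = i * i := by push_cast; rw [ha]
            omega)
          (fun e he hlt => hmin e he (by omega))
      rw [if_pos h1, sumPF_of_minFac_self n.toNat (by omega) hmf]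
      omega
    · rw [if_neg h1, sumPF_lt2 n.toNat (by omega)]
      omega
  | succ k ih =>
    intro i n s hk hi hn hmin
    simp only [pvA_sqrt]
    split
    · rename_i h
      have hin : i ≤ n := le_trans (by nlinarith) h
      have hd := A_div_eq n.toNat i n s le_rfl hi hn hmin
      rcases hd with ⟨d1, d2, d3, d4⟩
      have hle : (pvA_div n.toNat i n s).1 ≤ n := by
        have := Nat.le_of_dvd (show 0 < n.toNat by omega) d2
        omega
      have hmind : ∀ e : Nat, 2 ≤ e → (e : Int) < i + 1 → ¬ e ∣ (pvA_div n.toNat i n s).1.toNat := by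
        intro e he hlt hdv
        by_cases hei : (e : Int) < i
        · exact hmin e he hei (hdv.trans d2)
        · have : e = i.toNat := by omega
          exact d3 (this ▸ hdv)
      have hrec := ih (i + 1) (pvA_div n.toNat i n s).1 (pvA_div n.toNat i n s).2
        (by omega) (by omega) d1 hmind
      rw [hrec]
      omega
    · rename_i h
      have hni : n < i * i := by omega
      by_cases h1 : 1 < n
      · have hmf : n.toNat.minFac = n.toNat :=
          minFac_eq_self n.toNat i.toNat (by omega)
            (by
              have ha : (i.toNat : Int) = i := Int.toNat_of_nonneg (by omega)
              have hb : ((i.toNat * i.toNat : Nat) : Int) = i * i := by push_cast; rw [ha]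
              omega)
            (fun e he hlt => hmin e he (by omega))
        rw [if_pos h1, sumPF_of_minFac_self n.toNat (by omega) hmf]
        omega
      · rw [if_neg h1, sumPF_lt2 n.toNat (by omega)]
        omega

-- A's one outer pass computes sumPF
theorem A_pass_eq (n : Int) :
    (if 1 < (pvA_sqrt n.toNat 2 n 0).1 then (pvA_sqrt n.toNat 2 n 0).2 + (pvA_sqrt n.toNat 2 n 0).1
     else (pvA_sqrt n.toNat 2 n 0).2) = (sumPF n.toNat : Int) := by
  by_cases hn : 1 ≤ n
  · have h := A_sqrt_eq n.toNat 2 n 0 (by omega) (by omega) hn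
      (by intro e he hlt; exfalso; omega)
    split_ifs at * <;> omega
  · have h0 : n.toNat = 0 := by omega
    rw [h0]
    simp only [pvA_sqrt]
    rw [sumPF_lt2 0 (by omega)]
    split_ifs <;> omega

-- B's helper computes sumPF
theorem B_eq : ∀ f : Nat,
    (∀ n : Int, 1 ≤ f → 2 * n.toNat ≤ f → pvB_spf f n = (sumPF n.toNat : Int)) ∧
    (∀ d n : Int, 2 ≤ d → 2 ≤ n →
      (∀ e : Nat, 2 ≤ e → (e : Int) < d → ¬ e ∣ n.toNat) →
      n.toNat + (n + 1 - d).toNat ≤ f → pvB_loop f d n = (sumPF n.toNat : Int)) := by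
  intro f
  induction f using Nat.strong_induction_on with
  | _ f ih =>
    constructor
    · intro n hf1 hf2
      rcases f with _ | g
      · omega
      · simp only [pvB_spf]
        split
        · rw [sumPF_lt2 n.toNat (by omega)]; rfl
        · rename_i hn2
          have hn2' : 2 ≤ n := by omega
          exact (ih g (by omega)).2 2 n (by omega) (by omega)
            (by intro e he hlt; exfalso; omega) (by omega)
    · intro d n hd hn2 hmin hf
      rcases f with _ | g
      · omega
      · simp only [pvB_loop]
        split
        · rename_i h
          have hdn : d ≤ n := le_trans (by nlinarith) h
          split
          · rename_i hmod
            have hdvd : d ∣ n := (PySem.Int.mod_eq_zero_iff_dvd n d).1 hmod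
            have hq : PySem.Int.floordiv n d = n / d := PySem.Int.floordiv_eq_ediv_of_pos (by omega)
            have hmul : d * (n / d) = n := Int.mul_ediv_cancel' hdvd
            have hq0 : 0 ≤ n / d := Int.ediv_nonneg (by omega) (by omega)
            have hq1 : 1 ≤ n / d := by nlinarith
            have hqle : 2 * (n / d) ≤ n := by nlinarith
            have hqlt : n / d < n := pv_ediv_lt_self _ _ (by omega) (by omega)
            have hdvdN : d.toNat ∣ n.toNat := (pv_dvd_toNat d n (by omega) (by omega)).2 hdvd
            have hmf : n.toNat.minFac = d.toNat :=
              minFac_eq_of_min n.toNat d.toNat (by omega) hdvdN (by omega)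
                (fun e he hlt => hmin e he (by omega))
            have hqN : (n / d).toNat = n.toNat / d.toNat := by
              rcases hdvd with ⟨c, hc⟩
              have hc0 : 0 ≤ c := by nlinarith
              have he : n / d = c := by rw [hc]; exact Int.mul_ediv_cancel_left c (by omega)
              have hN : n.toNat = d.toNat * c.toNat := by
                have h1 : (d.toNat : Int) = d := Int.toNat_of_nonneg (by omega)
                have h2 : (c.toNat : Int) = c := Int.toNat_of_nonneg hc0
                have h3 : ((d.toNat * c.toNat : Nat) : Int) = (n.toNat : Int) := by
                  push_cast
                  rw [h1, h2]
                  omega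
                exact_mod_cast h3.symm
              rw [he, hN, Nat.mul_div_cancel_left _ (by omega)]
            have hsum : sumPF n.toNat = d.toNat + sumPF (n.toNat / d.toNat) := by
              rw [sumPF, dif_pos (by omega), hmf]
            rw [hq]
            have hrec := (ih g (by omega)).1 (n / d) (by omega) (by omega)
            rw [hrec, hsum, ← hqN]
            push_cast
            omega
          · rename_i hmod
            have hnd : ¬ d ∣ n := fun hdd => hmod ((PySem.Int.mod_eq_zero_iff_dvd n d).2 hdd)
            apply (ih g (by omega)).2 (d + 1) n (by omega) hn2
            · intro e he hlt hdv
              by_cases hed : (e : Int) < d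
              · exact hmin e he hed hdv
              · have : e = d.toNat := by omega
                subst this
                exact hnd ((pv_dvd_toNat d n (by omega) (by omega)).1 hdv)
            · omega
        · rename_i h
          have hnd : n < d * d := by omega
          have hmf : n.toNat.minFac = n.toNat :=
            minFac_eq_self n.toNat d.toNat (by omega)
              (by
                have ha : (d.toNat : Int) = d := Int.toNat_of_nonneg (by omega)
                have hb : ((d.toNat * d.toNat : Nat) : Int) = d * d := by push_cast; rw [ha]
                omega)
              (fun e he hlt => hmin e he (by omega))
          rw [sumPF_of_minFac_self n.toNat (by omega) hmf]
          omega

theorem B_spf_eq (n : Int) : pvB_spf (2 * n.toNat + 1) n = (sumPF n.toNat : Int) :=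
  (B_eq (2 * n.toNat + 1)).1 n (by omega) (by omega)

-- ideal fixed-point iteration of sumPF
def pvIter (n : Int) : Int :=
  if _h : (sumPF n.toNat : Int) = n then n else pvIter (sumPF n.toNat)
termination_by 2 * n.toNat + (if n < 0 then 1 else 0)
decreasing_by
  have hle := sumPF_le n.toNat
  split_ifs <;> omega

theorem A_iter_eq : ∀ (f : Nat) (n : Int), 2 * n.toNat + (if n < 0 then 1 else 0) < f →
    pvA_outer f n = pvIter n := by
  intro f
  induction f with
  | zero => intro n h; omega
  | succ g ih =>
    intro n hμ
    simp only [pvA_outer]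
    rw [A_pass_eq n, pvIter]
    by_cases hc : (sumPF n.toNat : Int) = n
    · rw [if_pos hc, dif_pos hc]
    · rw [if_neg hc, dif_neg hc]
      apply ih
      have hle := sumPF_le n.toNat
      split_ifs at hμ ⊢ <;> omega

theorem B_iter_eq : ∀ (f : Nat) (n : Int), 2 * n.toNat + (if n < 0 then 1 else 0) < f →
    pvB_drive f n = pvIter n := by
  intro f
  induction f with
  | zero => intro n h; omega
  | succ g ih =>
    intro n hμ
    simp only [pvB_drive]
    rw [B_spf_eq n, pvIter]
    by_cases hc : (sumPF n.toNat : Int) = n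
    · rw [if_pos hc, dif_pos hc]
    · rw [if_neg hc, dif_neg hc]
      apply ih
      have hle := sumPF_le n.toNat
      split_ifs at hμ ⊢ <;> omega

theorem agree (n : Int) : smallestValue n = smallestValue_alt n := by
  unfold smallestValue smallestValue_alt
  rw [A_iter_eq (2 * n.toNat + 2) n (by split_ifs <;> omega),
      B_iter_eq (2 * n.toNat + 2) n (by split_ifs <;> omega)]

-- ===== VERDICT (by name: the statement is the Claim_ definition above) =====
theorem smallestValue_spec : Claim_equal_smallestValue := by
  intro n _
  unfold Spec_smallestValue
  exact agree n
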